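-- pv_equiv track=rewrite | github.com/bgaro/WriteUps | 2023/404CTF/programmation/Des mots, des mots, des mots/solve.py | shift_vowels_left
-- ===== SOURCE A (Python) =====
-- voyelles = "aeiouyAEIOUY"
--
-- def shift_vowels_left(entry):
--     voy_index = []
--     list_entry = list(entry)
--     for ind, char in enumerate(entry):
--         if char in voyelles:
--             voy_index.append(ind)
--     if len(voy_index) == 0:
--         return entry
--     first_voy = list_entry[voy_index[0]]
--     for ind in range(len(voy_index) - 1):
--         list_entry[voy_index[ind]] = list_entry[voy_index[ind + 1]]
--     list_entry[voy_index[-1]] = first_voy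
--     return "".join(list_entry)
-- ===== SOURCE B (Python) =====
-- voyelles = "aeiouyAEIOUY"
--
-- def shift_vowels_left(entry):
--     vows = [c for c in entry if c in voyelles]
--     rotated = vows[1:] + vows[:1]
--     out = []
--     k = 0
--     for c in entry:
--         if c in voyelles:
--             out.append(rotated[k])
--             k += 1
--         else:
--             out.append(c)
--     return "".join(out)
-- ===== Notes on version B (the rewrite author's own statement) =====
-- stated objective: simpler
-- what changed: Instead of A's in-place neighbor-by-neighbor shift through collected vowel positions, B gathers the vowels, rotates them by list slicing (vows[1:]+vows[:1], which makes the empty/single-vowel cases fall out), and rebuilds the string in one pass consuming the rotated vowel stream.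
import Mathlib
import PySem

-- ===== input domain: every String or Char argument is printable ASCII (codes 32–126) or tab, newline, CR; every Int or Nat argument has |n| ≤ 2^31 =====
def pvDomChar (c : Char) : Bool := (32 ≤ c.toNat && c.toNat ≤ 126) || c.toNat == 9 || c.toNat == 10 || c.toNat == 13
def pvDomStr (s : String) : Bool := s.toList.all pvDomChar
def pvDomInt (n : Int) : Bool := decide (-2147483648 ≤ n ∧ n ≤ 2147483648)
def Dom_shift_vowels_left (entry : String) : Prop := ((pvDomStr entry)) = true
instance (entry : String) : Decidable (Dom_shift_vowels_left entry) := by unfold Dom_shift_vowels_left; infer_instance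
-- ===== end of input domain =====

-- B rebuilds the string in one pass from the slicing-rotated vowel list instead of A's in-place neighbor shift through vowel positions; objective: simpler.

def voyelles : String := "aeiouyAEIOUY"

def isVoy (c : Char) : Bool := voyelles.toList.contains c

-- ===== PORT A =====
def shift_vowels_left (entry : String) : String :=
  let list_entry := entry.toList
  let voy_index : List Int :=
    (PySem.List.enumerate entry.toList 0).foldl
      (fun acc p => if isVoy p.2 then acc ++ [p.1] else acc) []
  if voy_index.length == 0 then entry
  else
    let first_voy := PySem.List.pyGetD list_entry (PySem.List.pyGetD voy_index 0 0) ' '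
    let le2 := (PySem.List.pyRange 0 ((voy_index.length : Int) - 1) 1).foldl
      (fun le ind =>
        PySem.List.pySetD le (PySem.List.pyGetD voy_index ind 0)
          (PySem.List.pyGetD le (PySem.List.pyGetD voy_index (ind + 1) 0) ' '))
      list_entry
    String.ofList (PySem.List.pySetD le2 (PySem.List.pyGetD voy_index (-1) 0) first_voy)

-- ===== PORT B =====
-- consume the rotated vowel list one element per vowel position (B's index pointer k)
def fillVoy : List Char → List Char → List Char
  | [], _ => []
  | c :: cs, rs =>
    if isVoy c then
      match rs with
      | r :: rs' => r :: fillVoy cs rs'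
      | [] => c :: fillVoy cs []
    else c :: fillVoy cs rs

def shift_vowels_left_alt (entry : String) : String :=
  let vows := entry.toList.filter isVoy
  let rotated := vows.drop 1 ++ vows.take 1
  String.ofList (fillVoy entry.toList rotated)

-- ===== PRECONDITION & SPEC =====
def Spec_shift_vowels_left (entry : String) (out : String) : Prop := out = shift_vowels_left_alt entry
instance (entry : String) (out : String) : Decidable (Spec_shift_vowels_left entry out) := by unfold Spec_shift_vowels_left; infer_instance

-- ===== CLAIM (what is proved, stated in full; the proofs are below) =====
def Claim_equal_shift_vowels_left : Prop := ∀ (entry : String), Dom_shift_vowels_left entry → Spec_shift_vowels_left entry (shift_vowels_left entry)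

-- ===== LEMMAS AND PROOFS =====

/-- vowel positions of `cs`, counted from offset `n` (proof-side reference). -/
def idxs : Nat → List Char → List Nat
  | _, [] => []
  | n, c :: cs => if isVoy c then n :: idxs (n + 1) cs else idxs (n + 1) cs

/-- scatter writes (proof-side reference). -/
def writeAll (cs : List Char) (ps : List (Nat × Char)) : List Char :=
  ps.foldl (fun le p => le.set p.1 p.2) cs

/-- the Nat index list seen as Python ints. -/
def natsToInts (xs : List Nat) : List Int := xs.map (fun j : Nat => (j : Int))

theorem natsToInts_nil : natsToInts [] = [] := rfl

theorem natsToInts_cons (a : Nat) (xs : List Nat) :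
    natsToInts (a :: xs) = (a : Int) :: natsToInts xs := rfl

theorem length_natsToInts (xs : List Nat) : (natsToInts xs).length = xs.length := by
  simp [natsToInts]

theorem writeAll_cons_eq (cs : List Char) (p : Nat × Char) (ps : List (Nat × Char)) :
    writeAll cs (p :: ps) = writeAll (cs.set p.1 p.2) ps := rfl

theorem idxs_shift (cs : List Char) : ∀ n : Nat, idxs n cs = (idxs 0 cs).map (· + n) := by
  induction cs with
  | nil => intro n; simp [idxs]
  | cons c cs ih =>
    intro n
    simp only [idxs]
    by_cases h : isVoy c <;>
      simp [h, ih (n + 1), ih 1, List.map_map, Function.comp_def] <;>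
      intro a _ <;> omega

theorem length_idxs (cs : List Char) : (idxs 0 cs).length = (cs.filter isVoy).length := by
  induction cs with
  | nil => simp [idxs]
  | cons c cs ih =>
    simp only [idxs, List.filter_cons]
    by_cases h : isVoy c <;> simp [h, idxs_shift cs 1, ih]

theorem idxs_pairwise (cs : List Char) : (idxs 0 cs).Pairwise (· < ·) := by
  induction cs with
  | nil => simp [idxs]
  | cons c cs ih =>
    simp only [idxs]
    by_cases h : isVoy c
    · rw [if_pos h, idxs_shift cs 1, List.pairwise_cons]
      refine ⟨fun a ha => ?_, List.pairwise_map.mpr (ih.imp (fun hab => by omega))⟩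
      simp only [List.mem_map] at ha
      obtain ⟨b, _, rfl⟩ := ha
      omega
    · rw [if_neg (by simp [h]), idxs_shift cs 1]
      exact List.pairwise_map.mpr (ih.imp (fun hab => by omega))

theorem getD_map_succ (xs : List Nat) (t : Nat) (ht : t < xs.length) :
    (xs.map (· + 1)).getD t 0 = xs.getD t 0 + 1 := by
  rw [List.getD_eq_getElem _ _ (by simpa using ht), List.getElem_map, List.getD_eq_getElem _ _ ht]

theorem idxs_getD (cs : List Char) : ∀ t, t < (idxs 0 cs).length →
    cs.getD ((idxs 0 cs).getD t 0) ' ' = (cs.filter isVoy).getD t ' ' := by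
  induction cs with
  | nil => simp [idxs]
  | cons c cs ih =>
    intro t ht
    by_cases h : isVoy c
    · simp only [idxs, if_pos h, idxs_shift cs 1] at ht ⊢
      cases t with
      | zero => simp [h]
      | succ t =>
        simp only [List.length_cons, List.getD_cons_succ, List.filter_cons, h, if_pos] at ht ⊢
        simp only [List.length_map] at ht
        have ht' : t < (idxs 0 cs).length := by omega
        rw [getD_map_succ _ _ ht']
        simpa using ih t ht'
    · simp only [idxs, if_neg (by simp [h] : ¬ (isVoy c = true)), idxs_shift cs 1] at ht ⊢
      simp only [List.length_map] at ht
      rw [getD_map_succ _ _ ht, List.filter_cons_of_neg (by simp [h])]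
      simpa using ih t ht

theorem enum_filter (cs : List Char) : ∀ n : Nat,
    ((PySem.List.enumerate cs (n : Int)).filter (fun p => isVoy p.2)).map Prod.fst
      = natsToInts (idxs n cs) := by
  induction cs with
  | nil => intro n; simp [idxs, natsToInts, PySem.List.enumerate_nil]
  | cons c cs ih =>
    intro n
    rw [PySem.List.enumerate_cons, List.filter_cons]
    have hc : ((n : Int) + 1) = ((n + 1 : Nat) : Int) := by push_cast; ring
    by_cases h : isVoy c
    · rw [if_pos (by simp [h]), List.map_cons, hc, ih (n + 1)]
      simp only [idxs, if_pos h, natsToInts_cons]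
    · rw [if_neg (by simp [h]), hc, ih (n + 1)]
      simp only [idxs, if_neg (by simp [h] : ¬ (isVoy c = true))]

theorem enum_filter_zero (cs : List Char) :
    ((PySem.List.enumerate cs 0).filter (fun p => isVoy p.2)).map Prod.fst
      = natsToInts (idxs 0 cs) := by
  simpa only [Nat.cast_zero] using enum_filter cs 0

theorem writeAll_getD_not_mem (ps : List (Nat × Char)) : ∀ (cs : List Char) (j : Nat),
    j ∉ ps.map Prod.fst → (writeAll cs ps).getD j ' ' = cs.getD j ' ' := by
  induction ps with
  | nil => intro cs j _; rfl
  | cons p ps ih =>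
    intro cs j hj
    simp only [List.map_cons, List.mem_cons, not_or] at hj
    rw [writeAll_cons_eq, ih _ _ hj.2, List.getD_eq_getElem?_getD,
      List.getElem?_set_ne (Ne.symm hj.1), ← List.getD_eq_getElem?_getD]

theorem writeAll_append_single' (cs : List Char) (ps : List (Nat × Char)) (i : Nat) (x : Char) :
    writeAll cs (ps ++ [(i, x)]) = (writeAll cs ps).set i x := by
  simp [writeAll, List.foldl_append]

theorem writeAll_cons_shift (ps : List (Nat × Char)) : ∀ (x : Char) (cs : List Char),
    writeAll (x :: cs) (ps.map (fun p => (p.1 + 1, p.2))) = x :: writeAll cs ps := by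
  induction ps with
  | nil => intro x cs; rfl
  | cons p ps ih =>
    intro x cs
    simp only [List.map_cons]
    rw [writeAll_cons_eq, writeAll_cons_eq]
    simpa using ih x (cs.set p.1 p.2)

theorem zip_map_shift (xs : List Nat) (rs : List Char) :
    (xs.map (· + 1)).zip rs = (xs.zip rs).map (fun p => (p.1 + 1, p.2)) := by
  rw [List.zip_map_left]
  rfl

theorem fillVoy_writeAll (cs : List Char) : ∀ rs, fillVoy cs rs = writeAll cs ((idxs 0 cs).zip rs) := by
  induction cs with
  | nil => intro rs; rfl
  | cons c cs ih =>
    intro rs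
    by_cases h : isVoy c
    · simp only [fillVoy, if_pos h, idxs, idxs_shift cs 1]
      cases rs with
      | nil => simp [writeAll, ih []]
      | cons r rs' =>
        simp only [List.zip_cons_cons]
        rw [writeAll_cons_eq]
        simp only [List.set_cons_zero]
        rw [zip_map_shift, writeAll_cons_shift, ih rs']
    · simp only [fillVoy, if_neg (by simp [h] : ¬ (isVoy c = true)), idxs,
        idxs_shift cs 1]
      rw [zip_map_shift, writeAll_cons_shift, ih rs]

theorem natsToInts_getD (xs : List Nat) (t : Nat) (d : Int) (ht : t < xs.length) :
    (natsToInts xs).getD t d = ((xs.getD t 0 : Nat) : Int) := by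
  rw [natsToInts, List.getD_eq_getElem _ _ (by simpa using ht), List.getElem_map,
    List.getD_eq_getElem _ _ ht]

theorem natsToInts_getLast (xs : List Nat) (h : natsToInts xs ≠ []) (h2 : xs ≠ []) :
    (natsToInts xs).getLast h = ((xs.getD (xs.length - 1) 0 : Nat) : Int) := by
  have hlen : 0 < xs.length := by
    cases xs with
    | nil => exact absurd rfl h2
    | cons a xs => simp
  rw [List.getLast_eq_getElem]
  simp only [natsToInts, List.length_map, List.getElem_map]
  rw [List.getD_eq_getElem _ _ (by omega)]

theorem strict_not_mem_take (I : List Nat) (hp : I.Pairwise (· < ·)) (t m : Nat)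
    (ht : t < I.length) (hmt : m ≤ t) : I.getD t 0 ∉ I.take m := by
  intro hmem
  obtain ⟨s, hs, hseq⟩ := List.getElem_of_mem hmem
  rw [List.length_take, Nat.lt_min] at hs
  rw [List.getElem_take] at hseq
  have hst : s < t := by omega
  have := (List.pairwise_iff_getElem.mp hp) s t hs.2 ht hst
  rw [List.getD_eq_getElem _ _ ht] at hseq
  omega

theorem take_zip' (I : List Nat) (V : List Char) (m : Nat) :
    (I.zip V).take m = (I.take m).zip (V.take m) := by
  simp [List.zip, List.take_zipWith]

theorem map_fst_take_zip (I : List Nat) (V : List Char) (m : Nat)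
    (hm : m ≤ I.length) (hm' : m ≤ V.length) :
    ((I.zip V).take m).map Prod.fst = I.take m := by
  rw [take_zip', List.map_fst_zip]
  simp only [List.length_take]
  omega

-- the A-side loop computes exactly the scatter of the first m rotated vowels
theorem loopA (cs : List Char) : ∀ m : Nat, m ≤ (idxs 0 cs).length - 1 →
    (List.range m).foldl
      (fun (le : List Char) (t : Nat) =>
        PySem.List.pySetD le
          (PySem.List.pyGetD (natsToInts (idxs 0 cs)) (0 + (t : Int)) 0)
          (PySem.List.pyGetD le
            (PySem.List.pyGetD (natsToInts (idxs 0 cs)) (0 + (t : Int) + 1) 0) ' '))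
      cs
    = writeAll cs (((idxs 0 cs).zip ((cs.filter isVoy).drop 1)).take m) := by
  intro m
  induction m with
  | zero => intro _; simp [writeAll]
  | succ m ih =>
    intro hm
    have hk : (idxs 0 cs).length = (cs.filter isVoy).length := length_idxs cs
    have hm' : m ≤ (idxs 0 cs).length - 1 := by omega
    have hmk : m + 1 < (idxs 0 cs).length := by omega
    have hmk0 : m < (idxs 0 cs).length := by omega
    rw [List.range_succ, List.foldl_append, ih hm']
    simp only [List.foldl_cons, List.foldl_nil]
    have hc1 : (0 + (m : Int)) = ((m : Nat) : Int) := by ring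
    have hc2 : (0 + (m : Int) + 1) = ((m + 1 : Nat) : Int) := by push_cast; ring
    rw [hc2, hc1, PySem.List.pyGetD_natCast, PySem.List.pyGetD_natCast,
      natsToInts_getD _ _ _ hmk0, natsToInts_getD _ _ _ hmk,
      PySem.List.pySetD_natCast, PySem.List.pyGetD_natCast]
    have hdlen : ((cs.filter isVoy).drop 1).length = (idxs 0 cs).length - 1 := by
      simp [← hk]
    have hnm : (idxs 0 cs).getD (m + 1) 0
        ∉ (((idxs 0 cs).zip ((cs.filter isVoy).drop 1)).take m).map Prod.fst := by
      rw [map_fst_take_zip _ _ _ (by omega) (by omega)]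
      exact strict_not_mem_take _ (idxs_pairwise cs) _ _ hmk (by omega)
    rw [writeAll_getD_not_mem _ _ _ hnm, idxs_getD cs _ hmk]
    have hmVd : m < ((cs.filter isVoy).drop 1).length := by omega
    have hVd : (cs.filter isVoy).getD (m + 1) ' ' = ((cs.filter isVoy).drop 1).getD m ' ' := by
      rw [List.getD_eq_getElem _ _ (by omega), List.getD_eq_getElem _ _ hmVd,
        List.getElem_drop]
      exact getElem_congr_idx (Nat.add_comm m 1)
    have hzm : m < (((idxs 0 cs)).zip ((cs.filter isVoy).drop 1)).length := by
      simp only [List.length_zip]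
      omega
    have hzip : (((idxs 0 cs)).zip ((cs.filter isVoy).drop 1)).take (m + 1)
        = (((idxs 0 cs)).zip ((cs.filter isVoy).drop 1)).take m
          ++ [((idxs 0 cs).getD m 0, ((cs.filter isVoy).drop 1).getD m ' ')] := by
      rw [List.take_add_one, List.getElem?_eq_getElem hzm]
      simp only [Option.toList_some]
      congr 1
      rw [List.getElem_zip, List.getD_eq_getElem _ _ hmk0, List.getD_eq_getElem _ _ hmVd]
    rw [hVd, hzip, writeAll_append_single']

theorem zip_rot (I : List Nat) (v : Char) (vt : List Char) (hk : I.length = vt.length + 1) :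
    I.zip (vt ++ [v])
      = (I.zip vt).take (I.length - 1) ++ [(I.getD (I.length - 1) 0, v)] := by
  have h1 : I.length - 1 = vt.length := by omega
  have hItake : I = I.take vt.length ++ [I.getD vt.length 0] := by
    conv_lhs => rw [← List.take_append_drop vt.length I]
    congr 1
    rw [List.drop_eq_getElem_cons (by omega : vt.length < I.length),
      List.drop_eq_nil_of_le (by omega), List.getD_eq_getElem _ _ (by omega)]
  have htake : (I.zip vt).take (I.length - 1) = (I.take vt.length).zip vt := by
    rw [h1, take_zip', List.take_length]
  rw [htake, h1]
  conv_lhs => rw [hItake]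
  rw [List.zip_append (by simp only [List.length_take]; omega)]
  rfl

theorem main_eq (entry : String) : shift_vowels_left entry = shift_vowels_left_alt entry := by
  unfold shift_vowels_left shift_vowels_left_alt
  simp only []
  rw [PySem.List.foldl_append_if, List.nil_append, enum_filter_zero entry.toList]
  by_cases hemp : idxs 0 entry.toList = []
  · have hVnil : entry.toList.filter isVoy = [] := by
      have h := length_idxs entry.toList
      rw [hemp] at h
      exact List.length_eq_zero_iff.mp h.symm
    rw [if_pos (by simp [hemp, natsToInts_nil])]
    rw [hVnil]
    simp [fillVoy_writeAll, hemp, writeAll, String.ofList_toList]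
  · have hlen : 0 < (idxs 0 entry.toList).length :=
      Nat.pos_of_ne_zero (fun h0 => hemp (List.length_eq_zero_iff.mp h0))
    have hk : (idxs 0 entry.toList).length = (entry.toList.filter isVoy).length :=
      length_idxs entry.toList
    have hVne : entry.toList.filter isVoy ≠ [] := by
      intro h0
      rw [h0] at hk
      simp only [List.length_nil] at hk
      exact hemp (List.length_eq_zero_iff.mp hk)
    obtain ⟨v, vt, hVv⟩ : ∃ v vt, entry.toList.filter isVoy = v :: vt := by
      cases hV : entry.toList.filter isVoy with
      | nil => exact absurd hV hVne
      | cons a l => exact ⟨a, l, rfl⟩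
    have hmapne : natsToInts (idxs 0 entry.toList) ≠ [] := by
      intro h0
      have := length_natsToInts (idxs 0 entry.toList)
      rw [h0] at this
      simp at this
      omega
    rw [if_neg (by simp [length_natsToInts, hemp])]
    rw [PySem.List.pyGetD_zero, natsToInts_getD _ _ _ hlen, PySem.List.pyGetD_natCast,
      idxs_getD entry.toList 0 hlen]
    rw [PySem.List.pyGetD_neg_one (h := hmapne), natsToInts_getLast _ hmapne hemp,
      PySem.List.pySetD_natCast]
    have hrange : PySem.List.pyRange 0 (((natsToInts (idxs 0 entry.toList)).length : Int) - 1) 1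
        = (List.range ((idxs 0 entry.toList).length - 1)).map (fun k : Nat => (0 : Int) + (k : Int)) := by
      rw [PySem.List.pyRange_one]
      congr 2
      simp only [length_natsToInts]
      omega
    rw [hrange, List.foldl_map, loopA entry.toList ((idxs 0 entry.toList).length - 1) (by omega)]
    rw [fillVoy_writeAll, ← writeAll_append_single']
    congr 1
    have hdrop : (entry.toList.filter isVoy).drop 1 = vt := by rw [hVv]; rfl
    have htake1 : (entry.toList.filter isVoy).take 1 = [v] := by rw [hVv]; rfl
    have hget0 : (entry.toList.filter isVoy).getD 0 ' ' = v := by rw [hVv]; rfl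
    have hkv : (idxs 0 entry.toList).length = vt.length + 1 := by
      rw [hk, hVv, List.length_cons]
    rw [hget0, hdrop, htake1, zip_rot _ v vt hkv]

theorem shift_vowels_left_spec : Claim_equal_shift_vowels_left := by
  intro entry _
  unfold Spec_shift_vowels_left
  exact main_eq entry
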